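-- pv_equiv track=rewrite | github.com/szewczyk-bartosz/my-markdown-lang | bmd/renderer.py | render_table_bare
-- ===== SOURCE A (Python) =====
-- def render_table_bare(lines: list[str]) -> str:
--     rows: list[list[str]] = []
--     current_row: list[str] = []
--     for line in lines:
--         if line == "---":
--             if current_row:
--                 rows.append(current_row)
--             current_row = []
--         else:
--             current_row.append(line)
--     if current_row:
--         rows.append(current_row)
--     header = "".join(f"<th>{cell}</th>" for cell in rows[0])
--     body = "".join(
--         "<tr>" + "".join(f"<td>{cell}</td>" for cell in row) + "</tr>"
--         for row in rows[1:]
--     )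
--     return (
--         f"<figure>"
--         f"<table>"
--         f"<thead><tr>{header}</tr></thead>"
--         f"<tbody>{body}</tbody>"
--         f"</table>"
--         f"</figure>"
--     )
-- ===== SOURCE B (Python) =====
-- def _cells(tag, cells):
--     return "".join(f"<{tag}>{c}</{tag}>" for c in cells)
--
--
-- def render_table_bare(lines: list[str]) -> str:
--     # Extract maximal runs of non-separator lines by span scanning,
--     # instead of a running accumulator with flush-on-separator.
--     rows: list[list[str]] = []
--     i, n = 0, len(lines)
--     while i < n:
--         if lines[i] == "---":
--             i += 1
--         else:
--             j = i
--             while j < n and lines[j] != "---":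
--                 j += 1
--             rows.append(lines[i:j])
--             i = j
--     header = _cells("th", rows[0])
--     body = "".join("<tr>" + _cells("td", row) + "</tr>" for row in rows[1:])
--     return (
--         f"<figure>"
--         f"<table>"
--         f"<thead><tr>{header}</tr></thead>"
--         f"<tbody>{body}</tbody>"
--         f"</table>"
--         f"</figure>"
--     )
-- ===== Notes on version B (the rewrite author's own statement) =====
-- stated objective: alternative
-- what changed: Rows are extracted as maximal runs of non-'---' lines by a span scan (inner takeWhile-style loop) instead of A's running accumulator that is flushed at each separator; rendering keeps the same output format but is factored through a shared tag helper.
import Mathlib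
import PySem

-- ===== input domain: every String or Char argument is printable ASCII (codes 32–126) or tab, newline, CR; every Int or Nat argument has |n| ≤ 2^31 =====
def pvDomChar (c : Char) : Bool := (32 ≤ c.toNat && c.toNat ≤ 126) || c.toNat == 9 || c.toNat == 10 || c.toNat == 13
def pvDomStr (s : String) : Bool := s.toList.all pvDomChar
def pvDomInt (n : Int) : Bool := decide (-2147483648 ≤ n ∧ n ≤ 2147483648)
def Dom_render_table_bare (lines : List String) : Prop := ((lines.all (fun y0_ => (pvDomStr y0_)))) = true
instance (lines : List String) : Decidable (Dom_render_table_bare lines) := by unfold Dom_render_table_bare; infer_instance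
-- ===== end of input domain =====

-- B extracts rows as maximal runs of non-'---' lines by a span scan instead of A's
-- flush-on-separator accumulator loop; same rendering format. Equivalence of RETURN values.

-- ===== PORT A =====
-- one loop step: flush current_row on '---', else append the line to it
def stepA (st : List (List String) × List String) (line : String) :
    List (List String) × List String :=
  if line = "---" then
    if st.2 ≠ [] then (st.1 ++ [st.2], []) else (st.1, [])
  else
    (st.1, st.2 ++ [line])

-- the trailing 'if current_row: rows.append(current_row)'
def finishA (st : List (List String) × List String) : List (List String) :=
  if st.2 ≠ [] then st.1 ++ [st.2] else st.1

def rowsA (lines : List String) : List (List String) :=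
  finishA (lines.foldl stepA ([], []))

-- "".join(f"<th>{cell}</th>" for cell in cells), as the left fold the generator performs
def thA (cells : List String) : String :=
  cells.foldl (fun acc c => acc ++ "<th>" ++ c ++ "</th>") ""

def tdRowA (row : List String) : String :=
  "<tr>" ++ row.foldl (fun acc c => acc ++ "<td>" ++ c ++ "</td>") "" ++ "</tr>"

def bodyA (rows : List (List String)) : String :=
  rows.foldl (fun acc row => acc ++ tdRowA row) ""

def render_table_bare (lines : List String) : String :=
  match rowsA lines with
  | [] => ""   -- rows[0] raises IndexError in Python; excluded by Pre_
  | r0 :: rest =>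
      "<figure><table><thead><tr>" ++ thA r0 ++ "</tr></thead><tbody>" ++
        bodyA rest ++ "</tbody></table></figure>"

-- ===== PORT B =====
def notSep (l : String) : Bool := l ≠ "---"

-- span scan: skip separators, otherwise take the maximal run of content lines
def groupsB : List String → List (List String)
  | [] => []
  | l :: ls =>
      if l = "---" then groupsB ls
      else (l :: ls.takeWhile notSep) :: groupsB (ls.dropWhile notSep)
termination_by ls => ls.length
decreasing_by
  · simp
  · have := List.length_dropWhile_le notSep ls; simp; omega

-- _cells(tag, cells)
def cellsB (tag : String) (cells : List String) : String :=
  String.join (cells.map (fun c => "<" ++ tag ++ ">" ++ c ++ "</" ++ tag ++ ">"))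

def render_table_bare_alt (lines : List String) : String :=
  match groupsB lines with
  | [] => ""   -- rows[0] raises IndexError in Python; excluded by Pre_
  | r0 :: rest =>
      "<figure><table><thead><tr>" ++ cellsB "th" r0 ++ "</tr></thead><tbody>" ++
        String.join (rest.map (fun row => "<tr>" ++ cellsB "td" row ++ "</tr>")) ++
        "</tbody></table></figure>"

-- ===== PRECONDITION & SPEC =====
-- Pre_ excludes inputs with no content line (all lines '---', or empty input):
-- there both Pythons raise IndexError on rows[0].
def Pre_render_table_bare (lines : List String) : Prop :=
  lines.any notSep = true
instance (lines : List String) : Decidable (Pre_render_table_bare lines) := by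
  unfold Pre_render_table_bare; infer_instance

def pvWitness_render_table_bare : List String := ["a", "b", "---", "c", "d"]

def Spec_render_table_bare (lines : List String) (out : String) : Prop := out = render_table_bare_alt lines
instance (lines : List String) (out : String) : Decidable (Spec_render_table_bare lines out) := by unfold Spec_render_table_bare; infer_instance

-- ===== CLAIM (what is proved, stated in full; the proofs are below) =====
def Claim_equal_render_table_bare : Prop := ∀ (lines : List String), Dom_render_table_bare lines → Pre_render_table_bare lines → Spec_render_table_bare lines (render_table_bare lines)

-- ===== LEMMAS AND PROOFS =====

-- A's accumulator loop, parametrised by rows so far and the pending current_row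
def gaux : List String → List String → List (List String)
  | cur, [] => if cur = [] then [] else [cur]
  | cur, l :: ls =>
      if l = "---" then (if cur = [] then gaux [] ls else cur :: gaux [] ls)
      else gaux (cur ++ [l]) ls

theorem foldl_stepA (lines : List String) :
    ∀ (rows : List (List String)) (cur : List String),
      finishA (lines.foldl stepA (rows, cur)) = rows ++ gaux cur lines := by
  induction lines with
  | nil =>
      intro rows cur
      by_cases h : cur = [] <;> simp [finishA, gaux, h]
  | cons l ls ih =>
      intro rows cur
      simp only [List.foldl_cons, gaux, stepA]
      by_cases hl : l = "---"
      · by_cases hc : cur = []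
        · simp [hl, hc, ih]
        · simp [hl, hc, ih, List.append_assoc]
      · simp [hl, ih]

theorem groupsB_span (ls : List String) :
    groupsB ls =
      (if ls.takeWhile notSep = [] then [] else [ls.takeWhile notSep]) ++
        groupsB (ls.dropWhile notSep) := by
  cases ls with
  | nil => simp [groupsB]
  | cons m ms =>
      by_cases hm : m = "---"
      · simp [groupsB, hm, notSep]
      · simp [groupsB, hm, notSep]

theorem gaux_eq_span (lines : List String) :
    ∀ cur, gaux cur lines =
      (if cur ++ lines.takeWhile notSep = [] then [] else [cur ++ lines.takeWhile notSep]) ++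
        groupsB (lines.dropWhile notSep) := by
  induction lines with
  | nil =>
      intro cur
      by_cases h : cur = [] <;> simp [gaux, groupsB, h]
  | cons l ls ih =>
      intro cur
      by_cases hl : l = "---"
      · subst hl
        have h0 : gaux [] ls = groupsB ls := by
          rw [ih [], groupsB_span ls]; simp
        have hg : groupsB ("---" :: ls) = groupsB ls := by simp [groupsB]
        by_cases hc : cur = [] <;> simp [gaux, hc, h0, hg, notSep]
      · have htw : (l :: ls).takeWhile notSep = l :: ls.takeWhile notSep := by
          simp [notSep, hl]
        have hdw : (l :: ls).dropWhile notSep = ls.dropWhile notSep := by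
          simp [notSep, hl]
        simp only [gaux, hl, htw, hdw, ih (cur ++ [l])]
        simp

theorem rowsA_eq_groupsB (lines : List String) : rowsA lines = groupsB lines := by
  have h2 := gaux_eq_span lines []
  have h3 := groupsB_span lines
  simp only [List.nil_append] at h2
  rw [rowsA, foldl_stepA lines [] [], h2, ← h3]
  simp

-- fold-with-append equals join-of-map
theorem foldl_append_join {α : Type} (g : α → String) (l : List α) :
    ∀ acc : String, l.foldl (fun a c => a ++ g c) acc = acc ++ String.join (l.map g) := by
  induction l with
  | nil => intro acc; simp [String.join]
  | cons c cs ih =>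
      intro acc
      have hjoin : String.join (g c :: cs.map g) = g c ++ String.join (cs.map g) := by
        simp [String.join_eq]
      simp only [List.foldl_cons, List.map_cons, ih, hjoin]
      simp [String.append_assoc]

theorem thA_eq (cells : List String) : thA cells = cellsB "th" cells := by
  simp only [thA, cellsB]
  rw [show (fun (acc c : String) => acc ++ "<th>" ++ c ++ "</th>")
        = fun (acc c : String) => acc ++ ("<th>" ++ c ++ "</th>") by
      funext a c; simp [String.append_assoc]]
  rw [foldl_append_join (fun c => "<th>" ++ c ++ "</th>") cells ""]
  simp [String.append_assoc]

theorem tdRowA_eq (row : List String) :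
    tdRowA row = "<tr>" ++ cellsB "td" row ++ "</tr>" := by
  simp only [tdRowA, cellsB]
  rw [show (fun (acc c : String) => acc ++ "<td>" ++ c ++ "</td>")
        = fun (acc c : String) => acc ++ ("<td>" ++ c ++ "</td>") by
      funext a c; simp [String.append_assoc]]
  rw [foldl_append_join (fun c => "<td>" ++ c ++ "</td>") row ""]
  simp [String.append_assoc]

theorem bodyA_eq (rows : List (List String)) :
    bodyA rows = String.join (rows.map (fun row => "<tr>" ++ cellsB "td" row ++ "</tr>")) := by
  simp only [bodyA]
  rw [show (fun (acc : String) (row : List String) => acc ++ tdRowA row)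
        = fun acc row => acc ++ (fun row => "<tr>" ++ cellsB "td" row ++ "</tr>") row by
      funext a r; rw [tdRowA_eq]]
  rw [foldl_append_join (fun row => "<tr>" ++ cellsB "td" row ++ "</tr>") rows ""]
  simp

-- ===== VERDICT (by name: the statement is the Claim_ definition above) =====
theorem render_table_bare_spec : Claim_equal_render_table_bare := by
  intro lines _ _
  unfold Spec_render_table_bare render_table_bare render_table_bare_alt
  rw [rowsA_eq_groupsB]
  cases groupsB lines with
  | nil => rfl
  | cons r0 rest => simp only [thA_eq, bodyA_eq]
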